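-- pv_equiv track=rewrite | github.com/huynq247/lms_phase3 | app/services/progress_analytics_service.py | _calculate_best_streak
-- ===== SOURCE A (Python) =====
-- from typing import List, Optional, Dict, Any
--
-- def _calculate_best_streak(answers: List[Dict[str, Any]]) -> int:
--     """Calculate best streak from answers"""
--     best_streak = 0
--     current_streak = 0
--
--     for answer in answers:
--         if answer.get("was_correct", False):
--             current_streak += 1
--             best_streak = max(best_streak, current_streak)
--         else:
--             current_streak = 0
--
--     return best_streak
-- ===== SOURCE B (Python) =====
-- from typing import List, Optional, Dict, Any
--
-- def _calculate_best_streak(answers: List[Dict[str, Any]]) -> int: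
--     """Segment the answer stream into maximal runs of correct answers and
--     take the longest run length (0 if there is none)."""
--     keys = [a.get("was_correct", False) for a in answers]
--     best = 0
--     i = 0
--     n = len(keys)
--     while i < n:
--         if keys[i]:
--             j = i
--             while j < n and keys[j]:
--                 j += 1
--             best = max(best, j - i)
--             i = j
--         else:
--             i += 1
--     return best
-- ===== Notes on version B (the rewrite author's own statement) =====
-- stated objective: alternative
-- what changed: Instead of maintaining a running counter and best-so-far per element, B maps answers to their correctness keys, then scans by jumping over each maximal run of correct answers (two-pointer run segmentation) and maximises over run lengths.
import Mathlib
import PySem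

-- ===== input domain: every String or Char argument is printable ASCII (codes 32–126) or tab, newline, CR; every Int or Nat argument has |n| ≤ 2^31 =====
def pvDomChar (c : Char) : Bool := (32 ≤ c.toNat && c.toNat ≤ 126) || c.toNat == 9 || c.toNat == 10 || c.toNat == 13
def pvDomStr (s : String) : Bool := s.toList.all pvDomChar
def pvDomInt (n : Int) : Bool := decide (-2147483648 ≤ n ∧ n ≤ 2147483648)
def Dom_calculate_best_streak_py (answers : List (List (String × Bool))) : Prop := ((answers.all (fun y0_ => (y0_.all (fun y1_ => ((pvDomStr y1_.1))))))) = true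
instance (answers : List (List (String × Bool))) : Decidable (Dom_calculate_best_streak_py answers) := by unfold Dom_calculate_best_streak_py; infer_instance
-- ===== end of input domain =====

-- B replaces A's running-counter fold by a run-segmentation scan (jump over each
-- maximal run of correct answers, maximise over run lengths); same cost, alternative structure.

-- ===== PORT A =====
-- A: single pass keeping (best_streak, current_streak); reset on incorrect.
def calculate_best_streak_py (answers : List (List (String × Bool))) : Int :=
  (answers.foldl
    (fun (s : Int × Int) answer =>
      if (PySem.Dict.mk answer).getD "was_correct" false then
        (max s.1 (s.2 + 1), s.2 + 1)
      else
        (s.1, 0))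
    (0, 0)).1

-- ===== PORT B =====
-- the while-loop of Source B, rendered as recursion: skip an incorrect answer, or
-- measure the maximal run of correct answers and jump past it.
def pvBestRun : List Bool → Int
  | [] => 0
  | false :: rest => pvBestRun rest
  | true :: rest =>
      max (pvBestRun (rest.dropWhile (fun b => b)))
          (1 + ((rest.takeWhile (fun b => b)).length : Int))
termination_by l => l.length
decreasing_by
  · simp
  · exact Nat.lt_succ_of_le (List.length_dropWhile_le _ _)

def calculate_best_streak_py_alt (answers : List (List (String × Bool))) : Int :=
  pvBestRun (answers.map (fun a => (PySem.Dict.mk a).getD "was_correct" false))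

-- ===== PRECONDITION & SPEC =====
def Spec_calculate_best_streak_py (answers : List (List (String × Bool))) (out : Int) : Prop := out = calculate_best_streak_py_alt answers
instance (answers : List (List (String × Bool))) (out : Int) : Decidable (Spec_calculate_best_streak_py answers out) := by unfold Spec_calculate_best_streak_py; infer_instance

-- ===== CLAIM (what is proved, stated in full; the proofs are below) =====
def Claim_equal_calculate_best_streak_py : Prop := ∀ (answers : List (List (String × Bool))), Dom_calculate_best_streak_py answers → Spec_calculate_best_streak_py answers (calculate_best_streak_py answers)

-- ===== LEMMAS AND PROOFS =====

-- characterisation of A's fold: pvH cur l is the best streak reachable from a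
-- current streak of cur (the trailing streak is counted at each correct step).
def pvH : Int → List Bool → Int
  | _, [] => 0
  | cur, true :: l => max (cur + 1) (pvH (cur + 1) l)
  | _, false :: l => pvH 0 l

theorem pvH_nonneg (l : List Bool) : ∀ cur : Int, 0 ≤ cur → 0 ≤ pvH cur l := by
  induction l with
  | nil => intro cur _; simp [pvH]
  | cons b rest ih =>
    intro cur hc
    cases b with
    | false => simpa [pvH] using ih 0 le_rfl
    | true =>
      have := ih (cur + 1) (by omega)
      simp only [pvH]; omega

theorem pvBestRun_nonneg (l : List Bool) : 0 ≤ pvBestRun l := by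
  induction l using pvBestRun.induct with
  | case1 => simp [pvBestRun]
  | case2 rest ih => simpa [pvBestRun] using ih
  | case3 rest ih =>
    simp only [pvBestRun]
    omega

-- one unfolding step of pvBestRun, valid for every list
theorem pvBestRun_step (l : List Bool) :
    pvBestRun l = max ((l.takeWhile (fun b => b)).length : Int)
                      (pvBestRun (l.dropWhile (fun b => b))) := by
  cases l with
  | nil => simp [pvBestRun]
  | cons b rest =>
    cases b with
    | false =>
      have h := pvBestRun_nonneg rest
      simp [pvBestRun]
      omega
    | true =>
      simp [pvBestRun]
      omega

theorem pvH_eq_bestRun_aux (l : List Bool) :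
    ∀ cur : Int, 0 ≤ cur →
      max cur (pvH cur l)
        = max (cur + ((l.takeWhile (fun b => b)).length : Int))
              (pvBestRun (l.dropWhile (fun b => b))) := by
  induction l with
  | nil => intro cur hc; simp [pvH, pvBestRun]
  | cons b rest ih =>
    intro cur hc
    cases b with
    | false =>
      have h0 := ih 0 le_rfl
      have hn := pvH_nonneg rest 0 le_rfl
      have hs := pvBestRun_step rest
      simp only [pvH]
      simp [pvBestRun]
      omega
    | true =>
      have h1 := ih (cur + 1) (by omega)
      simp only [pvH]
      simp
      omega

theorem pvH_eq_bestRun (l : List Bool) : pvH 0 l = pvBestRun l := by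
  have h := pvH_eq_bestRun_aux l 0 le_rfl
  have hn := pvH_nonneg l 0 le_rfl
  have hs := pvBestRun_step l
  omega

-- A's fold computed from any valid state (0 ≤ cur ≤ best)
theorem foldA_eq_pvH (l : List Bool) :
    ∀ best cur : Int, 0 ≤ cur → cur ≤ best →
      (l.foldl (fun (s : Int × Int) b =>
          if b then (max s.1 (s.2 + 1), s.2 + 1) else (s.1, 0)) (best, cur)).1
        = max best (pvH cur l) := by
  induction l with
  | nil => intro best cur h0 hb; simp [pvH]; omega
  | cons b rest ih =>
    intro best cur h0 hb
    cases b with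
    | false =>
      have h := ih best 0 le_rfl (by omega)
      simp only [List.foldl_cons, pvH]
      simpa using h
    | true =>
      have h := ih (max best (cur + 1)) (cur + 1) (by omega) (le_max_right _ _)
      simp only [List.foldl_cons, pvH]
      simp only [if_true] at *
      rw [h]
      omega

-- bridge: A's fold over the answer dicts is the fold of the bool step over the key list
theorem foldl_map_step (answers : List (List (String × Bool))) (init : Int × Int) :
    answers.foldl (fun (s : Int × Int) answer =>
        if (PySem.Dict.mk answer).getD "was_correct" false then
          (max s.1 (s.2 + 1), s.2 + 1)
        else (s.1, 0)) init
      = (answers.map (fun a => (PySem.Dict.mk a).getD "was_correct" false)).foldl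
          (fun (s : Int × Int) b => if b then (max s.1 (s.2 + 1), s.2 + 1) else (s.1, 0)) init := by
  rw [List.foldl_map]

-- ===== VERDICT (by name: the statement is the Claim_ definition above) =====
theorem calculate_best_streak_py_spec : Claim_equal_calculate_best_streak_py := by
  intro answers _
  unfold Spec_calculate_best_streak_py calculate_best_streak_py calculate_best_streak_py_alt
  rw [foldl_map_step]
  rw [foldA_eq_pvH _ 0 0 le_rfl le_rfl, pvH_eq_bestRun]
  have := pvBestRun_nonneg (answers.map (fun a => (PySem.Dict.mk a).getD "was_correct" false))
  omega
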